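-- pv_equiv track=rewrite | github.com/xiaowulai-s/Equipment-Management | ModbusClient.py | _smart_group_registers
-- ===== SOURCE A (Python) =====
-- from typing import Optional, Dict, Callable, List, Any
--
-- def _smart_group_registers(addresses: List[int], max_gap: int = 5) -> List[List[int]]:
--     """智能分组寄存器地址
--
--     将连续或接近连续的寄存器地址分组，减少通信次数
--
--     Args:
--         addresses: 寄存器地址列表
--         max_gap: 最大地址间隔
--
--     Returns:
--         List[List[int]]: 分组后的地址列表
--     """
--     if not addresses:
--         return []
--
--     sorted_addrs = sorted(addresses)
--     groups = [[sorted_addrs[0]]]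
--
--     for addr in sorted_addrs[1:]:
--         last_group = groups[-1]
--         if addr - last_group[-1] <= max_gap:
--             # 添加到当前组
--             last_group.append(addr)
--         else:
--             # 开始新组
--             groups.append([addr])
--
--     return groups
-- ===== SOURCE B (Python) =====
-- def _smart_group_registers(addresses, max_gap=5):
--     """Two-pass variant: sort, compute cut positions where the gap exceeds
--     max_gap, then slice the sorted list at those boundaries."""
--     if not addresses:
--         return []
--     s = sorted(addresses)
--     n = len(s)
--     cuts = [i for i in range(1, n) if s[i] - s[i - 1] > max_gap]
--     bounds = [0] + cuts + [n]
--     return [s[a:b] for a, b in zip(bounds, bounds[1:])]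
-- ===== Notes on version B (the rewrite author's own statement) =====
-- stated objective: alternative
-- what changed: A builds the groups in one pass that mutates the last group via negative indexing; B first materialises the cut positions (indices where the sorted gap exceeds max_gap) and then slices the sorted list at those boundaries in a second pass.
import Mathlib
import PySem

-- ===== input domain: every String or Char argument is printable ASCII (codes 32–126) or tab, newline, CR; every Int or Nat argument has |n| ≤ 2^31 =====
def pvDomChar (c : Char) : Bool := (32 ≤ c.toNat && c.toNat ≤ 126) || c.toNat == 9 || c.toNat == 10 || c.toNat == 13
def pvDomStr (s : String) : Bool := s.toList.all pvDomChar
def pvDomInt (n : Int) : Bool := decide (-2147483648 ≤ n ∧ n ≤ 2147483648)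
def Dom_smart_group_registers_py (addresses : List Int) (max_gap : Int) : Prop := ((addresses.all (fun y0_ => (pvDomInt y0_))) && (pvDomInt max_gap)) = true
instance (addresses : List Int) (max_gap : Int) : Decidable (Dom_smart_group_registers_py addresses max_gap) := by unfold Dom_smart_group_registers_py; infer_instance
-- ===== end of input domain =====

-- B replaces A's single pass that mutates the last group with two passes: collect the
-- cut positions where the gap exceeds max_gap, then slice the sorted list at those
-- boundaries (objective: alternative decomposition, same cost).

-- ===== PORT A =====
-- loop body of A's 'for addr in sorted_addrs[1:]'
def pvStepA (max_gap : Int) (groups : List (List Int)) (addr : Int) : List (List Int) :=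
  let last_group := (PySem.List.pyGet? groups (-1)).getD []
  if addr - (PySem.List.pyGet? last_group (-1)).getD 0 ≤ max_gap then
    groups.dropLast ++ [last_group ++ [addr]]
  else
    groups ++ [[addr]]

def smart_group_registers_py (addresses : List Int) (max_gap : Int) : List (List Int) :=
  if addresses = [] then []
  else
    let sorted_addrs := PySem.List.sorted addresses (fun x => x)
    let groups : List (List Int) := [[(PySem.List.pyGet? sorted_addrs 0).getD 0]]
    (PySem.List.slice sorted_addrs (some 1) none).foldl (pvStepA max_gap) groups

-- ===== PORT B =====
def smart_group_registers_py_alt (addresses : List Int) (max_gap : Int) : List (List Int) :=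
  if addresses = [] then []
  else
    let s := PySem.List.sorted addresses (fun x => x)
    let n : Int := s.length
    let cuts := (PySem.List.pyRange 1 n 1).filter (fun i =>
      decide (max_gap < (PySem.List.pyGet? s i).getD 0 - (PySem.List.pyGet? s (i - 1)).getD 0))
    let bounds := 0 :: (cuts ++ [n])
    (bounds.zip (cuts ++ [n])).map (fun p => PySem.List.slice s (some p.1) (some p.2))

-- ===== PRECONDITION & SPEC =====
def Spec_smart_group_registers_py (addresses : List Int) (max_gap : Int) (out : List (List Int)) : Prop := out = smart_group_registers_py_alt addresses max_gap
instance (addresses : List Int) (max_gap : Int) (out : List (List Int)) : Decidable (Spec_smart_group_registers_py addresses max_gap out) := by unfold Spec_smart_group_registers_py; infer_instance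

-- ===== CLAIM (what is proved, stated in full; the proofs are below) =====
def Claim_equal_smart_group_registers_py : Prop := ∀ (addresses : List Int) (max_gap : Int), Dom_smart_group_registers_py addresses max_gap → Spec_smart_group_registers_py addresses max_gap (smart_group_registers_py addresses max_gap)

-- ===== LEMMAS AND PROOFS =====

-- reference grouping: recursion on the sorted list
def pvGrp (gap : Int) : List Int → List (List Int)
  | [] => []
  | [a] => [[a]]
  | a :: b :: t =>
    if b - a ≤ gap then
      match pvGrp gap (b :: t) with
      | g :: gs => (a :: g) :: gs
      | [] => [[a]]
    else [a] :: pvGrp gap (b :: t)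

-- Nat-indexed versions of B's two passes
def pvCutsN (gap : Int) (s : List Int) : List Nat :=
  (List.range' 1 (s.length - 1)).filter (fun i => decide (gap < s.getD i 0 - s.getD (i - 1) 0))

def pvSliceGroups (s : List Int) (cs : List Nat) : List (List Int) :=
  ((0 :: (cs ++ [s.length])).zip (cs ++ [s.length])).map (fun p => (s.drop p.1).take (p.2 - p.1))

-- ===== A side =====

lemma pvFoldA (gap : Int) : ∀ (t : List Int) (done : List (List Int)) (pre : List Int) (a : Int),
    ∃ r gs, pvGrp gap (a :: t) = (a :: r) :: gs ∧
      t.foldl (pvStepA gap) (done ++ [pre ++ [a]]) = done ++ (pre ++ a :: r) :: gs := by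
  intro t
  induction t with
  | nil => intro done pre a; exact ⟨[], [], rfl, by simp⟩
  | cons b t' ih =>
    intro done pre a
    have hstep : pvStepA gap (done ++ [pre ++ [a]]) b =
        if b - a ≤ gap then done ++ [(pre ++ [a]) ++ [b]] else (done ++ [pre ++ [a]]) ++ [[b]] := by
      simp [pvStepA, PySem.List.pyGet?_neg_one_append_singleton]
    by_cases h : b - a ≤ gap
    · obtain ⟨r', gs', hg, hf⟩ := ih done (pre ++ [a]) b
      refine ⟨b :: r', gs', ?_, ?_⟩
      · simp [pvGrp, h, hg]
      · simp only [List.foldl_cons, hstep, if_pos h]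
        simpa using hf
    · obtain ⟨r', gs', hg, hf⟩ := ih (done ++ [pre ++ [a]]) [] b
      refine ⟨[], (b :: r') :: gs', ?_, ?_⟩
      · simp [pvGrp, h, hg]
      · simp only [List.foldl_cons, hstep, if_neg h]
        simpa using hf

-- ===== B side =====

lemma pvCuts_shift (gap a b : Int) (t : List Int) :
    pvCutsN gap (a :: b :: t) =
      (if gap < b - a then [1] else []) ++ (pvCutsN gap (b :: t)).map (· + 1) := by
  have hlen : (a :: b :: t).length - 1 = t.length + 1 := by simp
  have hrange : List.range' 1 (t.length + 1) = 1 :: (List.range' 1 t.length).map (· + 1) := by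
    rw [List.range'_succ, List.range'_succ_left]
  unfold pvCutsN
  rw [hlen, hrange]
  simp only [List.filter_cons, List.filter_map]
  have hcong : List.filter
      ((fun i => decide (gap < (a :: b :: t).getD i 0 - (a :: b :: t).getD (i - 1) 0)) ∘ (fun x => x + 1))
      (List.range' 1 t.length)
      = List.filter (fun i => decide (gap < (b :: t).getD i 0 - (b :: t).getD (i - 1) 0))
        (List.range' 1 t.length) := by
    refine List.filter_congr ?_
    intro i hi
    have h1 : 1 ≤ i := (List.mem_range'_1.mp hi).1
    obtain ⟨j, rfl⟩ : ∃ j, i = j + 1 := ⟨i - 1, by omega⟩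
    simp [List.getD]
  rw [hcong]
  have hlen2 : (b :: t).length - 1 = t.length := by simp
  rw [hlen2]
  by_cases h : gap < b - a <;> simp [List.getD, h]

lemma pvSliceGroups_map_pair (u : List Int) (a : Int) (L : List (Nat × Nat)) :
    (L.map (Prod.map (· + 1) (· + 1))).map (fun p => ((a :: u).drop p.1).take (p.2 - p.1))
      = L.map (fun p => (u.drop p.1).take (p.2 - p.1)) := by
  rw [List.map_map]
  refine List.map_congr_left ?_
  intro p _
  simp [Prod.map]

lemma pvBounds_ne_nil (cs : List Nat) (n : Nat) : ∃ x X', cs ++ [n] = x :: X' :=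
  match h : cs ++ [n] with
  | y :: ys => ⟨y, ys, rfl⟩
  | [] => by simp at h

lemma pvSliceGroups_cons_shift (a : Int) (s' : List Int) (cs : List Nat) :
    pvSliceGroups (a :: s') (cs.map (· + 1)) =
      match pvSliceGroups s' cs with
      | g :: gs => (a :: g) :: gs
      | [] => [[a]] := by
  obtain ⟨x, X', hX⟩ := pvBounds_ne_nil cs s'.length
  unfold pvSliceGroups
  have h1 : cs.map (· + 1) ++ [(a :: s').length] = ((x :: X').map (· + 1)) := by
    have : cs.map (· + 1) ++ [(a :: s').length] = (cs ++ [s'.length]).map (· + 1) := by simp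
    rw [this, hX]
  rw [h1, hX]
  simp only [List.map_cons, List.zip_cons_cons, List.map_cons]
  rw [show ((x + 1) :: X'.map (· + 1)) = (x :: X').map (· + 1) by simp, List.zip_map,
    pvSliceGroups_map_pair]
  simp

lemma pvSliceGroups_cons_cut (a : Int) (s' : List Int) (cs : List Nat) :
    pvSliceGroups (a :: s') (1 :: cs.map (· + 1)) = [a] :: pvSliceGroups s' cs := by
  obtain ⟨x, X', hX⟩ := pvBounds_ne_nil cs s'.length
  unfold pvSliceGroups
  have h1 : cs.map (· + 1) ++ [(a :: s').length] = ((x :: X').map (· + 1)) := by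
    have : cs.map (· + 1) ++ [(a :: s').length] = (cs ++ [s'.length]).map (· + 1) := by simp
    rw [this, hX]
  rw [show (1 :: cs.map (· + 1)) ++ [(a :: s').length] = 1 :: (cs.map (· + 1) ++ [(a :: s').length]) by simp,
    h1, hX]
  simp only [List.map_cons, List.zip_cons_cons, List.map_cons]
  rw [show ((x + 1) :: X'.map (· + 1)) = (x :: X').map (· + 1) by simp, List.zip_map,
    pvSliceGroups_map_pair]
  simp

lemma pvSliceGroups_grp (gap : Int) : ∀ (s : List Int), s ≠ [] →
    pvSliceGroups s (pvCutsN gap s) = pvGrp gap s := by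
  intro s
  induction s with
  | nil => intro h; exact absurd rfl h
  | cons a s' ih =>
    intro _
    cases s' with
    | nil => simp [pvSliceGroups, pvCutsN, pvGrp]
    | cons b t =>
      have ihs := ih (by simp)
      rw [pvCuts_shift]
      by_cases h : gap < b - a
      · rw [if_pos h]
        rw [show ([1] : List Nat) ++ (pvCutsN gap (b :: t)).map (· + 1)
              = 1 :: (pvCutsN gap (b :: t)).map (· + 1) by simp]
        rw [pvSliceGroups_cons_cut, ihs, pvGrp.eq_3, if_neg (by omega : ¬ b - a ≤ gap)]
      · rw [if_neg h, List.nil_append, pvSliceGroups_cons_shift, ihs, pvGrp.eq_3,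
          if_pos (by omega : b - a ≤ gap)]

-- bridge: B's Int-indexed passes are the Nat-indexed ones
lemma pvAltCore (max_gap : Int) (s : List Int) :
    ((0 :: ((PySem.List.pyRange 1 (s.length : Int) 1).filter (fun i =>
          decide (max_gap < (PySem.List.pyGet? s i).getD 0 - (PySem.List.pyGet? s (i - 1)).getD 0))
        ++ [(s.length : Int)])).zip
      ((PySem.List.pyRange 1 (s.length : Int) 1).filter (fun i =>
          decide (max_gap < (PySem.List.pyGet? s i).getD 0 - (PySem.List.pyGet? s (i - 1)).getD 0))
        ++ [(s.length : Int)])).map (fun p => PySem.List.slice s (some p.1) (some p.2))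
      = pvSliceGroups s (pvCutsN max_gap s) := by
  have hrange : PySem.List.pyRange 1 (s.length : Int) 1 =
      (List.range' 1 (s.length - 1)).map (fun k : Nat => (k : Int)) := by
    rw [PySem.List.pyRange_one, List.range'_eq_map_range, List.map_map]
    have h1 : ((s.length : Int) - 1).toNat = s.length - 1 := by omega
    rw [h1]
    refine List.map_congr_left ?_
    intro k _
    simp
  have hcuts :
      (PySem.List.pyRange 1 (s.length : Int) 1).filter (fun i =>
          decide (max_gap < (PySem.List.pyGet? s i).getD 0 - (PySem.List.pyGet? s (i - 1)).getD 0))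
        = (pvCutsN max_gap s).map (fun k : Nat => (k : Int)) := by
    rw [hrange, List.filter_map]
    unfold pvCutsN
    congr 1
    refine List.filter_congr ?_
    intro k hk
    have h1 : 1 ≤ k := (List.mem_range'_1.mp hk).1
    have hk1 : ((k : Int) - 1) = ((k - 1 : Nat) : Int) := by omega
    simp only [Function.comp_apply, PySem.List.pyGet?_natCast, hk1]
    simp [List.getD_eq_getElem?_getD]
  rw [hcuts]
  have hX : (pvCutsN max_gap s).map (fun k : Nat => (k : Int)) ++ [(s.length : Int)]
      = (pvCutsN max_gap s ++ [s.length]).map (fun k : Nat => (k : Int)) := by simp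
  rw [hX]
  unfold pvSliceGroups
  rw [show ((0 : Int) :: (pvCutsN max_gap s ++ [s.length]).map (fun k : Nat => (k : Int)))
        = ((0 :: (pvCutsN max_gap s ++ [s.length])).map (fun k : Nat => (k : Int))) by simp]
  rw [List.zip_map, List.map_map]
  refine List.map_congr_left ?_
  intro p _
  simp [Prod.map, PySem.List.slice_natCast]

-- ===== VERDICT (by name: the statement is the Claim_ definition above) =====
theorem smart_group_registers_py_spec : Claim_equal_smart_group_registers_py := by
  intro addresses max_gap _
  unfold Spec_smart_group_registers_py
  unfold smart_group_registers_py smart_group_registers_py_alt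
  by_cases hemp : addresses = []
  · simp [hemp]
  · simp only [if_neg hemp]
    generalize hsg : PySem.List.sorted addresses (fun x => x) = s
    have hsne : s ≠ [] := by
      rw [← hsg]
      simp [PySem.List.sorted_eq_nil_iff, hemp]
    obtain ⟨h, t, rfl⟩ : ∃ h t, s = h :: t :=
      match s, hsne with
      | x :: xs, _ => ⟨x, xs, rfl⟩
    rw [pvAltCore, pvSliceGroups_grp max_gap (h :: t) (by simp)]
    obtain ⟨r, gs, hg, hf⟩ := pvFoldA max_gap t [] [] h
    simp only [PySem.List.pyGet?_zero_cons, Option.getD_some, PySem.List.slice_from_one,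
      List.tail_cons]
    rw [show ([[h]] : List (List Int)) = [] ++ [[] ++ [h]] by simp, hf, hg]
    simp
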